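-- pv_equiv track=rewrite | github.com/clefourrier/CopperMT | pipeline/data/management/from_file/utils.py | remove_duplicates_in_list
-- ===== SOURCE A (Python) =====
-- def remove_duplicates_in_list(data_list):
--     duplicates = get_duplicates(data_list)
--
--     indices_to_remove = []
--     for dup in duplicates:
--         indices_to_remove.extend(
--             get_indices_of_duplicate_items_after_first(data_list, dup))
--
--     remove_indices(data_list, indices_to_remove)
--     return indices_to_remove
--
-- def get_duplicates(list_containing_duplicates):
--     seen = set()
--     duplicates = []
--     for item in list_containing_duplicates:
--         if item[0] not in seen:  # item is a list of one phonetized word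
--             seen.add(item[0])
--         else:
--             duplicates.append(item)
--     return duplicates
--
-- def remove_indices(data_list, indices: list):
--     # We want the indices to be in reversed order to pop values from the back of the list,
--     # in order not to affect the remaining indices
--     indices = list(set(indices))
--     indices.sort(reverse=True)
--     for index in indices:
--         data_list.pop(index)
--
-- def get_indices_of_duplicate_items_after_first(seq, item):
--     start_at = -1
--     locs = []
--     while True:
--         try:
--             loc = seq.index(item, start_at + 1)
--         except ValueError:
--             break
--         else:
--             locs.append(loc)
--             start_at = loc
--     return locs[1:]
-- ===== SOURCE B (Python) =====
-- def remove_duplicates_in_list(data_list):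
--     # One pass: positions of every full item, keyed by tuple(item)
--     occ = {}
--     for i, item in enumerate(data_list):
--         occ[tuple(item)] = occ.get(tuple(item), []) + [i]
--     seen = set()
--     result = []
--     for item in data_list:
--         if item[0] in seen:
--             result.extend(occ[tuple(item)][1:])
--         else:
--             seen.add(item[0])
--     for index in sorted(set(result), reverse=True):
--         data_list.pop(index)
--     return result
-- ===== Notes on version B (the rewrite author's own statement) =====
-- stated objective: faster
-- what changed: Replaced the per-duplicate repeated list.index scans (a quadratic rescan of the whole list for every duplicate item) by one enumerate pass building a dict from full item to its list of positions, so each duplicate's removed indices are a single O(1) dict lookup.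
import Mathlib
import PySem

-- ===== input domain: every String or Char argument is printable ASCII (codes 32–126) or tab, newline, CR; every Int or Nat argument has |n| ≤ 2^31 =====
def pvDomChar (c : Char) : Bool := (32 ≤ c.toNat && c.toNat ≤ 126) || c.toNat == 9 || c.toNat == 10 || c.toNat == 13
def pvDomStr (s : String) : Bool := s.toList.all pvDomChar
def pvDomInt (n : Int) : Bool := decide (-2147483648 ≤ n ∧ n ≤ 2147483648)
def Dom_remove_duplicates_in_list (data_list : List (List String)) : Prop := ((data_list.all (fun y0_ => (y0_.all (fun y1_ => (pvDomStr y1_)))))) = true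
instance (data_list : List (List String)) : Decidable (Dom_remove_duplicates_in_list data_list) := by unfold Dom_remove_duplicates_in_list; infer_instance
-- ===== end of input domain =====

-- A removes later duplicate occurrences (keyed on item[0] then full item) and returns the removed indices
-- via repeated list.index scans (quadratic); B builds a positions dict in one pass (the reported speed is the
-- timing run's). Both Pythons mutate data_list in place identically; the equivalence proved here is about
-- the RETURN value only.


-- ===== PORT A =====

-- get_duplicates: seen-set over item[0], later items with a seen key are collected in order.
-- item[0] is ported total as getD ""; Pre_ excludes the empty sublists where Python raises IndexError.
def pvGetDuplicates (xs : List (List String)) : PySem.Set String × List (List String) :=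
  xs.foldl (fun (st : PySem.Set String × List (List String)) item =>
    let k := (PySem.List.pyGet? item 0).getD ""
    if st.1.contains k = false then (PySem.Set.add st.1 k, st.2)
    else (st.1, st.2 ++ [item])) (PySem.Set.empty, [])

-- seq.index(item, start): first index ≥ start holding item (ValueError = none)
def pvIndexFrom (seq : List (List String)) (item : List String) (start : Nat) : Option Int :=
  ((seq.drop start).findIdx? (· == item)).map (fun k => ((start + k : Nat) : Int))

-- the while-True loop of get_indices_of_duplicate_items_after_first; the Nat argument is start_at + 1
-- (it is -1 + 1 = 0 initially and loc + 1 ≥ 0 afterwards); fuel seq.length + 1 never runs out because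
-- each found location strictly advances the start (proved in pvLocLoop_spec below).
def pvLocLoop (seq : List (List String)) (item : List String) : Nat → Nat → List Int → List Int
  | 0, _, locs => locs
  | fuel + 1, start, locs =>
    match pvIndexFrom seq item start with
    | none => locs
    | some loc => pvLocLoop seq item fuel (loc.toNat + 1) (locs ++ [loc])

def pvGetIndicesAfterFirst (seq : List (List String)) (item : List String) : List Int :=
  (pvLocLoop seq item (seq.length + 1) 0 []).drop 1    -- locs[1:]

def remove_duplicates_in_list (data_list : List (List String)) : List Int :=
  let duplicates := (pvGetDuplicates data_list).2
  -- remove_indices only mutates data_list; the function returns indices_to_remove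
  duplicates.foldl (fun acc dup => acc ++ pvGetIndicesAfterFirst data_list dup) []

-- ===== PORT B =====

-- occ: tuple(item) -> list of all its positions, built in one enumerate pass
def pvBuildOcc (data_list : List (List String)) : PySem.Dict (List String) (List Int) :=
  (PySem.List.enumerate data_list 0).foldl
    (fun d p => d.modify p.2 [] (· ++ [p.1])) PySem.Dict.empty

def remove_duplicates_in_list_alt (data_list : List (List String)) : List Int :=
  let occ := pvBuildOcc data_list
  (data_list.foldl (fun (st : PySem.Set String × List Int) item =>
    let k := (PySem.List.pyGet? item 0).getD ""
    if st.1.contains k then (st.1, st.2 ++ (occ.getD item []).drop 1)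
    else (PySem.Set.add st.1 k, st.2)) (PySem.Set.empty, [])).2
  -- the final pop loop only mutates data_list; the return value is result

-- ===== PRECONDITION & SPEC =====
-- Pre_ excludes exactly the inputs containing an empty sublist, on which Python's item[0] raises IndexError.
def Pre_remove_duplicates_in_list (data_list : List (List String)) : Prop :=
  ∀ item ∈ data_list, item ≠ []
instance (data_list : List (List String)) : Decidable (Pre_remove_duplicates_in_list data_list) := by
  unfold Pre_remove_duplicates_in_list; infer_instance

def pvWitness_remove_duplicates_in_list : List (List String) :=
  [["a"], ["b", "x"], ["a"], ["a", "y"]]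

def Spec_remove_duplicates_in_list (data_list : List (List String)) (out : List Int) : Prop := out = remove_duplicates_in_list_alt data_list
instance (data_list : List (List String)) (out : List Int) : Decidable (Spec_remove_duplicates_in_list data_list out) := by unfold Spec_remove_duplicates_in_list; infer_instance

-- ===== CLAIM (what is proved, stated in full; the proofs are below) =====
def Claim_equal_remove_duplicates_in_list : Prop := ∀ (data_list : List (List String)), Dom_remove_duplicates_in_list data_list → Pre_remove_duplicates_in_list data_list → Spec_remove_duplicates_in_list data_list (remove_duplicates_in_list data_list)

-- ===== LEMMAS AND PROOFS =====

-- reference: the positions (as Int) of `item` in xs, counting from base b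
def pvOccs (item : List String) : List (List String) → Nat → List Int
  | [], _ => []
  | x :: xs, b => if x == item then (b : Int) :: pvOccs item xs (b + 1) else pvOccs item xs (b + 1)

lemma pvOccs_length_le (item : List String) : ∀ (ys : List (List String)) (b : Nat),
    (pvOccs item ys b).length ≤ ys.length := by
  intro ys; induction ys with
  | nil => intro b; simp [pvOccs]
  | cons x xs ih =>
    intro b
    by_cases h : x == item
    · simpa [pvOccs, h] using ih (b + 1)
    · simp only [pvOccs, h, Bool.false_eq_true, if_false, List.length_cons]
      exact Nat.le_succ_of_le (ih (b + 1))

lemma pvIndexFrom_eq_head (item : List String) : ∀ (ys : List (List String)) (b : Nat),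
    ((ys.findIdx? (· == item)).map (fun k => ((b + k : Nat) : Int))) = (pvOccs item ys b).head? := by
  intro ys; induction ys with
  | nil => intro b; simp [pvOccs]
  | cons x xs ih =>
    intro b
    by_cases h : x == item
    · simp [pvOccs, h, List.findIdx?_cons]
    · simp only [pvOccs, h, List.findIdx?_cons, Bool.false_eq_true, if_false]
      rw [← ih (b + 1)]
      cases List.findIdx? (fun x => x == item) xs <;> simp
      ring

lemma pvOccs_head_decomp (item : List String) : ∀ (ys : List (List String)) (b : Nat) (loc : Int),
    (pvOccs item ys b).head? = some loc →
    ∃ j : Nat, loc = (j : Int) ∧ b ≤ j ∧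
      pvOccs item ys b = (j : Int) :: pvOccs item (ys.drop (j + 1 - b)) (j + 1) := by
  intro ys; induction ys with
  | nil => intro b loc h; simp [pvOccs] at h
  | cons x xs ih =>
    intro b loc h
    by_cases hx : x == item
    · simp [pvOccs, hx] at h
      refine ⟨b, by omega, le_refl b, ?_⟩
      have h1 : b + 1 - b = 1 := by omega
      rw [h1]
      simp [pvOccs, hx]
    · simp only [pvOccs, hx, Bool.false_eq_true, if_false] at h ⊢
      obtain ⟨j, hj1, hj2, hj3⟩ := ih (b + 1) loc h
      refine ⟨j, hj1, by omega, ?_⟩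
      rw [hj3]
      congr 2
      have : j + 1 - b = (j + 1 - (b + 1)) + 1 := by omega
      rw [this]
      simp

lemma pvLocLoop_spec (seq : List (List String)) (item : List String) :
    ∀ (fuel start : Nat) (locs : List Int),
    (pvOccs item (seq.drop start) start).length < fuel →
    pvLocLoop seq item fuel start locs = locs ++ pvOccs item (seq.drop start) start := by
  intro fuel
  induction fuel with
  | zero => intro start locs h; omega
  | succ fuel ih =>
    intro start locs h
    have hidx : pvIndexFrom seq item start = (pvOccs item (seq.drop start) start).head? :=
      pvIndexFrom_eq_head item (seq.drop start) start
    cases hO : (pvOccs item (seq.drop start) start).head? with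
    | none =>
      have : pvOccs item (seq.drop start) start = [] := by
        cases hc : pvOccs item (seq.drop start) start with
        | nil => rfl
        | cons a l => rw [hc] at hO; simp at hO
      simp [pvLocLoop, hidx, this]
    | some loc =>
      obtain ⟨j, hj1, hj2, hj3⟩ := pvOccs_head_decomp item (seq.drop start) start loc hO
      have hdrop : (seq.drop start).drop (j + 1 - start) = seq.drop (j + 1) := by
        rw [List.drop_drop]; congr 1; omega
      have hlen : (pvOccs item (seq.drop (j + 1)) (j + 1)).length < fuel := by
        have := congrArg List.length hj3
        rw [hdrop] at this
        simp at this; omega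
      have hrec := ih (j + 1) (locs ++ [loc]) hlen
      simp only [pvLocLoop, hidx, hO]
      have hj : loc.toNat = j := by rw [hj1]; simp
      rw [hj, hrec, hj3, hdrop, hj1]
      simp
      
lemma pvGetIndicesAfterFirst_eq (seq : List (List String)) (item : List String) :
    pvGetIndicesAfterFirst seq item = (pvOccs item seq 0).drop 1 := by
  unfold pvGetIndicesAfterFirst
  rw [pvLocLoop_spec seq item (seq.length + 1) 0 []]
  · simp
  · simpa using Nat.lt_succ_of_le (pvOccs_length_le item seq 0)

-- B's dict of positions holds exactly the occurrence lists
lemma pvBuildOcc_getD (item : List String) : ∀ (xs : List (List String)) (b : Nat)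
    (d : PySem.Dict (List String) (List Int)),
    ((PySem.List.enumerate xs (b : Int)).foldl (fun d p => d.modify p.2 [] (· ++ [p.1])) d).getD item []
      = d.getD item [] ++ pvOccs item xs b := by
  intro xs; induction xs with
  | nil => intro b d; simp [PySem.List.enumerate_nil, pvOccs]
  | cons x xs ih =>
    intro b d
    rw [PySem.List.enumerate_cons]
    simp only [List.foldl_cons]
    have hcast : ((b : Int) + 1) = ((b + 1 : Nat) : Int) := by push_cast; ring
    rw [hcast, ih (b + 1)]
    by_cases hx : x == item
    · have hxi : x = item := by simpa using hx
      rw [hxi, PySem.Dict.getD_modify_self]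
      simp [pvOccs]
    · have hxi : item ≠ x := fun h => by simp [h] at hx
      rw [PySem.Dict.getD_modify_of_ne _ _ _ hxi]
      simp [pvOccs, hx]

-- reference: the duplicates list produced by A's seen-loop
def pvDups : List (List String) → PySem.Set String → List (List String)
  | [], _ => []
  | x :: xs, seen =>
    let k := (PySem.List.pyGet? x 0).getD ""
    if seen.contains k then x :: pvDups xs seen else pvDups xs (PySem.Set.add seen k)

lemma pvGetDuplicates_fold (xs : List (List String)) :
    ∀ (seen : PySem.Set String) (acc : List (List String)),
    (xs.foldl (fun (st : PySem.Set String × List (List String)) item =>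
        let k := (PySem.List.pyGet? item 0).getD ""
        if st.1.contains k = false then (PySem.Set.add st.1 k, st.2)
        else (st.1, st.2 ++ [item])) (seen, acc)).2 = acc ++ pvDups xs seen := by
  induction xs with
  | nil => intro seen acc; simp [pvDups]
  | cons x xs ih =>
    intro seen acc
    simp only [List.foldl_cons]
    by_cases h : seen.contains ((PySem.List.pyGet? x 0).getD "") = false
    · rw [if_pos h, ih]
      simp only [pvDups, h, Bool.false_eq_true, if_false]
    · rw [if_neg h, ih]
      have h' : seen.contains ((PySem.List.pyGet? x 0).getD "") = true := by
        revert h; cases seen.contains ((PySem.List.pyGet? x 0).getD "") <;> simp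
      simp only [pvDups, h', if_true]
      simp

lemma alt_fold (g : List String → List Int) (xs : List (List String)) :
    ∀ (seen : PySem.Set String) (acc : List Int),
    (xs.foldl (fun (st : PySem.Set String × List Int) item =>
        let k := (PySem.List.pyGet? item 0).getD ""
        if st.1.contains k then (st.1, st.2 ++ g item)
        else (PySem.Set.add st.1 k, st.2)) (seen, acc)).2
      = acc ++ (pvDups xs seen).flatMap g := by
  induction xs with
  | nil => intro seen acc; simp [pvDups]
  | cons x xs ih =>
    intro seen acc
    simp only [List.foldl_cons]
    by_cases h : seen.contains ((PySem.List.pyGet? x 0).getD "") = true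
    · rw [if_pos h, ih]
      simp only [pvDups, h, if_true]
      simp
    · rw [if_neg h, ih]
      have h' : seen.contains ((PySem.List.pyGet? x 0).getD "") = false := by
        revert h; cases seen.contains ((PySem.List.pyGet? x 0).getD "") <;> simp
      simp only [pvDups, h', Bool.false_eq_true, if_false]

-- ===== VERDICT (by name: the statement is the Claim_ definition above) =====
theorem remove_duplicates_in_list_spec : Claim_equal_remove_duplicates_in_list := by
  intro data_list _ _
  unfold Spec_remove_duplicates_in_list remove_duplicates_in_list remove_duplicates_in_list_alt
  rw [PySem.List.foldl_append_eq_flatMap]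
  unfold pvGetDuplicates
  rw [pvGetDuplicates_fold data_list PySem.Set.empty [],
      alt_fold _ data_list PySem.Set.empty []]
  simp only [List.nil_append]
  apply List.flatMap_congr
  intro item _
  rw [pvGetIndicesAfterFirst_eq]
  unfold pvBuildOcc
  rw [show (0 : Int) = ((0 : Nat) : Int) from rfl, pvBuildOcc_getD item data_list 0 PySem.Dict.empty]
  simp [PySem.Dict.getD_empty]
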